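-- pv_equiv track=rewrite | github.com/ElectionLens/ElectionLens | scripts/perfect_candidate_match.py | party_matches
-- ===== SOURCE A (Python) =====
-- def party_matches(party1, party2):
--     """Check if parties match."""
--     if not party1 or not party2:
--         return False
--
--     p1 = party1.upper().strip()
--     p2 = party2.upper().strip()
--
--     if p1 == p2:
--         return True
--
--     # Handle IND variations
--     if 'IND' in p1 and 'IND' in p2:
--         return True
--
--     # Handle party abbreviation variations
--     aliases = {
--         'AIADMK': ['ADMK', 'AIADMK'],
--         'DMK': ['DMK'],
--         'BJP': ['BJP', 'BHARATIYA JANATA PARTY'],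
--         'INC': ['INC', 'CONGRESS', 'INDIAN NATIONAL CONGRESS'],
--         'NTK': ['NTK', 'NAAM TAMILAR KATCHI'],
--         'AMMK': ['AMMK'],
--         'PMK': ['PMK'],
--         'DMDK': ['DMDK'],
--         'BSP': ['BSP'],
--     }
--
--     for _, variations in aliases.items():
--         if p1 in variations and p2 in variations:
--             return True
--
--     return False
-- ===== SOURCE B (Python) =====
-- # Same falsy guard, normalization, equality and IND checks; the per-group scanning
-- # loop is replaced by a precomputed inverted index (alias -> canonical group) and
-- # two dictionary lookups.
--
-- _INDEX = {
--     'ADMK': 'AIADMK', 'AIADMK': 'AIADMK',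
--     'DMK': 'DMK',
--     'BJP': 'BJP', 'BHARATIYA JANATA PARTY': 'BJP',
--     'INC': 'INC', 'CONGRESS': 'INC', 'INDIAN NATIONAL CONGRESS': 'INC',
--     'NTK': 'NTK', 'NAAM TAMILAR KATCHI': 'NTK',
--     'AMMK': 'AMMK', 'PMK': 'PMK', 'DMDK': 'DMDK', 'BSP': 'BSP',
-- }
--
-- def party_matches(party1, party2):
--     """Check if parties match."""
--     if not party1 or not party2:
--         return False
--     p1 = party1.upper().strip()
--     p2 = party2.upper().strip()
--     if p1 == p2:
--         return True
--     if 'IND' in p1 and 'IND' in p2: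
--         return True
--     c1 = _INDEX.get(p1)
--     return c1 is not None and _INDEX.get(p2) == c1
-- ===== Notes on version B (the rewrite author's own statement) =====
-- stated objective: idiomatic
-- what changed: The per-group scanning loop over the aliases dict is replaced by a precomputed inverted index (alias -> canonical group) and two single lookups, guarded so that two unknown names do not match.
import Mathlib
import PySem

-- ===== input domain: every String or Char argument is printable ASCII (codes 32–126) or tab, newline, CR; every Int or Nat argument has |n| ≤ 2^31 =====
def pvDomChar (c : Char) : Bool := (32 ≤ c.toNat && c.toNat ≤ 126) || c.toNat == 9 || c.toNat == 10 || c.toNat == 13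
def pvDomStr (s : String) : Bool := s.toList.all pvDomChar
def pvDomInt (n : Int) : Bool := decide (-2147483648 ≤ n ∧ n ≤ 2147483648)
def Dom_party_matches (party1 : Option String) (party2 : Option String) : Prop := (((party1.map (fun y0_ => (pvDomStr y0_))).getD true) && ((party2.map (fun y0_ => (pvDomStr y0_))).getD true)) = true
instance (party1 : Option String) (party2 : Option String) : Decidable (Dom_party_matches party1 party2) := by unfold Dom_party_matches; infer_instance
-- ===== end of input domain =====

-- B replaces A's per-group scanning loop by a precomputed inverted index (alias -> group key) and two lookups (idiomatic; same observable behaviour).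

-- ===== PORT A =====
def pvAliases : List (String × List String) :=
  [("AIADMK", ["ADMK", "AIADMK"]),
   ("DMK", ["DMK"]),
   ("BJP", ["BJP", "BHARATIYA JANATA PARTY"]),
   ("INC", ["INC", "CONGRESS", "INDIAN NATIONAL CONGRESS"]),
   ("NTK", ["NTK", "NAAM TAMILAR KATCHI"]),
   ("AMMK", ["AMMK"]),
   ("PMK", ["PMK"]),
   ("DMDK", ["DMDK"]),
   ("BSP", ["BSP"])]

-- the 'for _, variations in aliases.items():' loop with its early return
def pvAliasLoop : List (String × List String) → String → String → Bool
  | [], _, _ => false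
  | (_, vars) :: rest, p1, p2 =>
      if vars.contains p1 && vars.contains p2 then true else pvAliasLoop rest p1 p2

def party_matches (party1 : Option String) (party2 : Option String) : Bool :=
  match party1, party2 with
  | some s1, some s2 =>
      if s1 == "" || s2 == "" then false
      else
        let p1 := PySem.Str.strip (PySem.Str.upper s1)
        let p2 := PySem.Str.strip (PySem.Str.upper s2)
        if p1 == p2 then true
        else if PySem.Str.isIn "IND" p1 && PySem.Str.isIn "IND" p2 then true
        else pvAliasLoop pvAliases p1 p2
  | _, _ => false

-- ===== PORT B =====
def pvIndex : PySem.Dict String String :=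
  PySem.Dict.ofList
    [("ADMK", "AIADMK"), ("AIADMK", "AIADMK"),
     ("DMK", "DMK"),
     ("BJP", "BJP"), ("BHARATIYA JANATA PARTY", "BJP"),
     ("INC", "INC"), ("CONGRESS", "INC"), ("INDIAN NATIONAL CONGRESS", "INC"),
     ("NTK", "NTK"), ("NAAM TAMILAR KATCHI", "NTK"),
     ("AMMK", "AMMK"), ("PMK", "PMK"), ("DMDK", "DMDK"), ("BSP", "BSP")]

def party_matches_alt (party1 : Option String) (party2 : Option String) : Bool :=
  match party1 with
  | none => false
  | some s1 =>
    match party2 with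
    | none => false
    | some s2 =>
      if s1 == "" || s2 == "" then false
      else
        let p1 := PySem.Str.strip (PySem.Str.upper s1)
        let p2 := PySem.Str.strip (PySem.Str.upper s2)
        if p1 == p2 then true
        else if PySem.Str.isIn "IND" p1 && PySem.Str.isIn "IND" p2 then true
        else
          match pvIndex.get? p1 with
          | none => false
          | some c1 => pvIndex.get? p2 == some c1

-- ===== PRECONDITION & SPEC =====
def Spec_party_matches (party1 : Option String) (party2 : Option String) (out : Bool) : Prop := out = party_matches_alt party1 party2
instance (party1 : Option String) (party2 : Option String) (out : Bool) : Decidable (Spec_party_matches party1 party2 out) := by unfold Spec_party_matches; infer_instance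

-- ===== CLAIM (what is proved, stated in full; the proofs are below) =====
def Claim_equal_party_matches : Prop := ∀ (party1 : Option String) (party2 : Option String), Dom_party_matches party1 party2 → Spec_party_matches party1 party2 (party_matches party1 party2)

-- ===== LEMMAS AND PROOFS =====

-- all strings occurring as aliases (= the keys of the inverted index)
def pvKeys : List String :=
  ["ADMK", "AIADMK", "DMK", "BJP", "BHARATIYA JANATA PARTY", "INC", "CONGRESS",
   "INDIAN NATIONAL CONGRESS", "NTK", "NAAM TAMILAR KATCHI", "AMMK", "PMK", "DMDK", "BSP"]

lemma pvIndex_mk : pvIndex = PySem.Dict.mk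
    [("ADMK", "AIADMK"), ("AIADMK", "AIADMK"),
     ("DMK", "DMK"),
     ("BJP", "BJP"), ("BHARATIYA JANATA PARTY", "BJP"),
     ("INC", "INC"), ("CONGRESS", "INC"), ("INDIAN NATIONAL CONGRESS", "INC"),
     ("NTK", "NTK"), ("NAAM TAMILAR KATCHI", "NTK"),
     ("AMMK", "AMMK"), ("PMK", "PMK"), ("DMDK", "DMDK"), ("BSP", "BSP")] := by rfl

lemma pvGet?_none (q : String) (h : q ∉ pvKeys) : pvIndex.get? q = none := by
  simp only [pvKeys, List.mem_cons, List.not_mem_nil, or_false, not_or] at h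
  obtain ⟨n1, n2, n3, n4, n5, n6, n7, n8, n9, n10, n11, n12, n13, n14⟩ := h
  rw [pvIndex_mk]
  simp [PySem.Dict.get?,
    Ne.symm n1, Ne.symm n2, Ne.symm n3, Ne.symm n4, Ne.symm n5, Ne.symm n6, Ne.symm n7,
    Ne.symm n8, Ne.symm n9, Ne.symm n10, Ne.symm n11, Ne.symm n12, Ne.symm n13, Ne.symm n14]

lemma pvLoop_false_right (p1 p2 : String) (h : p2 ∉ pvKeys) :
    pvAliasLoop pvAliases p1 p2 = false := by
  simp only [pvKeys, List.mem_cons, List.not_mem_nil, or_false, not_or] at h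
  obtain ⟨n1, n2, n3, n4, n5, n6, n7, n8, n9, n10, n11, n12, n13, n14⟩ := h
  simp [pvAliasLoop, pvAliases,
    n1, n2, n3, n4, n5, n6, n7, n8, n9, n10, n11, n12, n13, n14]

lemma pvLoop_false_left (p1 p2 : String) (h : p1 ∉ pvKeys) :
    pvAliasLoop pvAliases p1 p2 = false := by
  simp only [pvKeys, List.mem_cons, List.not_mem_nil, or_false, not_or] at h
  obtain ⟨n1, n2, n3, n4, n5, n6, n7, n8, n9, n10, n11, n12, n13, n14⟩ := h
  simp [pvAliasLoop, pvAliases,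
    n1, n2, n3, n4, n5, n6, n7, n8, n9, n10, n11, n12, n13, n14]

set_option maxHeartbeats 4000000 in
lemma pvTail (p1 p2 : String) :
    pvAliasLoop pvAliases p1 p2 =
      (match pvIndex.get? p1 with
       | none => false
       | some c1 => pvIndex.get? p2 == some c1) := by
  rw [pvIndex_mk]
  by_cases h1 : p1 ∈ pvKeys
  · by_cases h2 : p2 ∈ pvKeys
    · simp only [pvKeys, List.mem_cons, List.not_mem_nil, or_false] at h1 h2
      rcases h1 with rfl|rfl|rfl|rfl|rfl|rfl|rfl|rfl|rfl|rfl|rfl|rfl|rfl|rfl <;>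
        rcases h2 with rfl|rfl|rfl|rfl|rfl|rfl|rfl|rfl|rfl|rfl|rfl|rfl|rfl|rfl <;> decide
    · rw [pvLoop_false_right p1 p2 h2, ← pvIndex_mk, pvGet?_none p2 h2]
      cases pvIndex.get? p1 <;> simp
  · rw [pvLoop_false_left p1 p2 h1, ← pvIndex_mk, pvGet?_none p1 h1]

-- ===== VERDICT (by name: the statement is the Claim_ definition above) =====
theorem party_matches_spec : Claim_equal_party_matches := by
  intro party1 party2 _
  unfold Spec_party_matches party_matches party_matches_alt
  match party1, party2 with
  | none, none => rfl
  | none, some _ => rfl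
  | some _, none => rfl
  | some s1, some s2 =>
    simp only []
    split_ifs <;> simp [pvTail]
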